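-- pv_equiv track=rewrite | github.com/semenko/rseqc-redux | rseqc/bam_cigar.py | fetch_insertion_range
-- ===== SOURCE A (Python) =====
-- def fetch_insertion_range(cigar: list[tuple[int, int]]) -> list[tuple[int, int]]:
--     """fetch insertion regions defined by cigar. st must be zero based
--     return list of tuple of (st, end). 'st','end' is relative to the
--     start of read.
--     """
--     ins_bound = []
--     st = 0
--     for c, s in cigar:  # code and size
--         if c == 0:  # match
--             st += s
--         elif c == 4:
--             st += s  # soft clip
--         elif c == 1:  # insertion to ref
--             ins_bound.append((st, s))
--             st += s
--         elif c == 2:  # deletion to ref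
--             continue
--         elif c == 3:  # gap or intron
--             continue
--         else:
--             continue
--     return ins_bound
-- ===== SOURCE B (Python) =====
-- def fetch_insertion_range(cigar: list[tuple[int, int]]) -> list[tuple[int, int]]:
--     """fetch insertion regions defined by cigar, computed BACKWARDS:
--     the offset of an insertion equals the total read length minus the
--     read length consumed from that insertion (inclusive) to the end,
--     so a single right-to-left scan with a suffix sum suffices; the
--     collected results are reversed at the end."""
--     total = sum(s for c, s in cigar if c in (0, 1, 4))
--     out = []
--     suffix = 0
--     for c, s in reversed(cigar):
--         if c in (0, 1, 4):
--             suffix += s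
--         if c == 1:
--             out.append((total - suffix, s))
--     out.reverse()
--     return out
-- ===== Notes on version B (the rewrite author's own statement) =====
-- stated objective: alternative
-- what changed: B scans the cigar right-to-left: it computes the total read length once, then derives each insertion's offset as total minus the running suffix of read-consuming sizes and reverses the collected list, instead of A's forward loop with a mutable prefix position and in-order appends.
import Mathlib
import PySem

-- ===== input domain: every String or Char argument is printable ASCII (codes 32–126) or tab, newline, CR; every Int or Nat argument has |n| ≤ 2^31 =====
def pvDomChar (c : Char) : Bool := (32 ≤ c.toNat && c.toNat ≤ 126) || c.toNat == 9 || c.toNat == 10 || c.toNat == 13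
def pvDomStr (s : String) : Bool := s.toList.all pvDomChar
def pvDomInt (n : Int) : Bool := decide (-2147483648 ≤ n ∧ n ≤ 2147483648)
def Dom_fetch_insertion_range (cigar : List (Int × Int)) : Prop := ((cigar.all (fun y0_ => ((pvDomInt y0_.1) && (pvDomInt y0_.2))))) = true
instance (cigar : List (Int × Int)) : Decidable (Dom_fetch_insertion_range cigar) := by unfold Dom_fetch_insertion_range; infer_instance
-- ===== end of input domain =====

-- B replaces A's forward prefix-position loop with a right-to-left scan: offsets are
-- total read length minus a suffix sum, output reversed at the end; alternative structure, same cost.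


-- ===== PORT A =====
-- one forward loop with state (ins_bound, st), branch chain in A's order
def fetch_insertion_range_step (st : List (Int × Int) × Int) (cs : Int × Int) :
    List (Int × Int) × Int :=
  let c := cs.1
  let s := cs.2
  if c == 0 then (st.1, st.2 + s)
  else if c == 4 then (st.1, st.2 + s)
  else if c == 1 then (st.1 ++ [(st.2, s)], st.2 + s)
  else if c == 2 then st
  else if c == 3 then st
  else st

def fetch_insertion_range (cigar : List (Int × Int)) : List (Int × Int) :=
  (cigar.foldl fetch_insertion_range_step ([], 0)).1

-- ===== PORT B =====
-- total = sum(s for c, s in cigar if c in (0, 1, 4))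
def fetch_insertion_range_total (cigar : List (Int × Int)) : Int :=
  cigar.foldl (fun a cs => if cs.1 == 0 || cs.1 == 1 || cs.1 == 4 then a + cs.2 else a) 0

-- the reversed-iteration loop body: state (suffix, out)
def fetch_insertion_range_rstep (total : Int) (st : Int × List (Int × Int)) (cs : Int × Int) :
    Int × List (Int × Int) :=
  let suffix := if cs.1 == 0 || cs.1 == 1 || cs.1 == 4 then st.1 + cs.2 else st.1
  (suffix, if cs.1 == 1 then st.2 ++ [(total - suffix, cs.2)] else st.2)

def fetch_insertion_range_alt (cigar : List (Int × Int)) : List (Int × Int) :=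
  let total := fetch_insertion_range_total cigar
  let res := cigar.reverse.foldl (fetch_insertion_range_rstep total) (0, [])
  res.2.reverse

-- ===== PRECONDITION & SPEC =====
def Spec_fetch_insertion_range (cigar : List (Int × Int)) (out : List (Int × Int)) : Prop := out = fetch_insertion_range_alt cigar
instance (cigar : List (Int × Int)) (out : List (Int × Int)) : Decidable (Spec_fetch_insertion_range cigar out) := by unfold Spec_fetch_insertion_range; infer_instance

-- ===== CLAIM (what is proved, stated in full; the proofs are below) =====
def Claim_equal_fetch_insertion_range : Prop := ∀ (cigar : List (Int × Int)), Dom_fetch_insertion_range cigar → Spec_fetch_insertion_range cigar (fetch_insertion_range cigar)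

-- ===== LEMMAS AND PROOFS =====
-- read-consumed length of a cigar
def pvRC (l : List (Int × Int)) : Int :=
  match l with
  | [] => 0
  | (c, s) :: t => (if c == 0 || c == 1 || c == 4 then s else 0) + pvRC t

-- reference list: insertions with offsets measured down from `total`
def pvIns (total : Int) (l : List (Int × Int)) : List (Int × Int) :=
  match l with
  | [] => []
  | (c, s) :: t =>
      (if c == 1 then [(total - pvRC ((c, s) :: t), s)] else []) ++ pvIns total t

theorem pvTotal_eq_rc (l : List (Int × Int)) :
    ∀ a : Int, l.foldl (fun a cs => if cs.1 == 0 || cs.1 == 1 || cs.1 == 4 then a + cs.2 else a) a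
      = a + pvRC l := by
  induction l with
  | nil => intro a; simp [pvRC]
  | cons hd tl ih =>
      intro a
      obtain ⟨c, s⟩ := hd
      simp only [List.foldl_cons, pvRC, ih]
      split_ifs <;> ring

theorem pvA_step_eq (acc : List (Int × Int)) (st : Int) (c s : Int) :
    fetch_insertion_range_step (acc, st) (c, s) =
      if c = 1 then (acc ++ [(st, s)], st + s)
      else if c = 0 ∨ c = 4 then (acc, st + s)
      else (acc, st) := by
  simp only [fetch_insertion_range_step]
  by_cases h0 : c = 0 <;> by_cases h1 : c = 1 <;> by_cases h4 : c = 4 <;>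
    by_cases h2 : c = 2 <;> by_cases h3 : c = 3 <;> simp_all

theorem pvA_eq_ins (l : List (Int × Int)) :
    ∀ (acc : List (Int × Int)) (st : Int),
      (l.foldl fetch_insertion_range_step (acc, st)).1 = acc ++ pvIns (st + pvRC l) l := by
  induction l with
  | nil => intro acc st; simp [pvIns]
  | cons hd tl ih =>
      intro acc st
      obtain ⟨c, s⟩ := hd
      rw [List.foldl_cons, pvA_step_eq]
      by_cases h1 : c = 1
      · rw [if_pos h1]
        rw [ih]
        simp [pvIns, pvRC, h1, add_assoc]
      · rw [if_neg h1]
        by_cases hrc : c = 0 ∨ c = 4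
        · rw [if_pos hrc]
          rw [ih]
          have hc1 : ¬ (c == 0 || c == 1 || c == 4) = false := by
            rcases hrc with h | h <;> simp [h]
          simp only [pvIns, pvRC]
          rcases hrc with h | h <;> simp [h, add_assoc]
        · rw [if_neg hrc]
          rw [ih]
          have h0 : ¬ c = 0 := fun h => hrc (Or.inl h)
          have h4 : ¬ c = 4 := fun h => hrc (Or.inr h)
          simp [pvIns, pvRC, h0, h1, h4]

theorem pvB_foldr (total : Int) (l : List (Int × Int)) :
    l.foldr (fun cs st => fetch_insertion_range_rstep total st cs) (0, []) =
      (pvRC l, (pvIns total l).reverse) := by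
  induction l with
  | nil => simp [pvRC, pvIns]
  | cons hd tl ih =>
      obtain ⟨c, s⟩ := hd
      rw [List.foldr_cons, ih]
      simp only [fetch_insertion_range_rstep, pvIns, pvRC]
      by_cases h0 : c = 0
      · simp [h0]; ring_nf
      · by_cases h4 : c = 4
        · simp [h4]; ring_nf
        · by_cases h1 : c = 1
          · simp [h1]; omega
          · simp [h0, h1, h4]

-- ===== VERDICT (by name: the statement is the Claim_ definition above) =====
theorem fetch_insertion_range_spec : Claim_equal_fetch_insertion_range := by
  intro cigar _
  unfold Spec_fetch_insertion_range fetch_insertion_range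
  show (cigar.foldl fetch_insertion_range_step ([], 0)).1 =
    (cigar.reverse.foldl (fetch_insertion_range_rstep (fetch_insertion_range_total cigar))
      (0, [])).2.reverse
  rw [List.foldl_reverse, pvB_foldr, pvA_eq_ins]
  unfold fetch_insertion_range_total
  rw [pvTotal_eq_rc]
  simp
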